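-- pv_equiv track=rewrite | github.com/BugmakerCC/Trace | src/data_dependency.py | filter_exception_values
-- ===== SOURCE A (Python) =====
-- def filter_exception_values(var_dependencies):
--
--     if None in var_dependencies:
--         var_dependencies.pop(None)
--     for var in var_dependencies:
--         if var in var_dependencies[var]:
--             var_dependencies[var].remove(var)
--         if 'this' in var_dependencies[var]:
--             var_dependencies[var].remove('this')
--         if 'msg' in var_dependencies[var]:
--             var_dependencies[var].remove('msg')
--     return var_dependencies
-- ===== SOURCE B (Python) =====
-- def filter_exception_values(var_dependencies):
--     if None in var_dependencies:
--         var_dependencies.pop(None)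
--     for var in var_dependencies:
--         targets = [var, 'this', 'msg']
--         filtered = []
--         for x in var_dependencies[var]:
--             if x in targets:
--                 targets.remove(x)
--             else:
--                 filtered.append(x)
--         var_dependencies[var][:] = filtered
--     return var_dependencies
-- ===== Notes on version B (the rewrite author's own statement) =====
-- stated objective: alternative
-- what changed: Instead of three separate membership-scan-then-remove passes per value list, B makes a single left-to-right pass over each list with a shrinking multiset of targets [var, 'this', 'msg'], dropping an element only while its target copy is still pending.
import Mathlib
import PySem

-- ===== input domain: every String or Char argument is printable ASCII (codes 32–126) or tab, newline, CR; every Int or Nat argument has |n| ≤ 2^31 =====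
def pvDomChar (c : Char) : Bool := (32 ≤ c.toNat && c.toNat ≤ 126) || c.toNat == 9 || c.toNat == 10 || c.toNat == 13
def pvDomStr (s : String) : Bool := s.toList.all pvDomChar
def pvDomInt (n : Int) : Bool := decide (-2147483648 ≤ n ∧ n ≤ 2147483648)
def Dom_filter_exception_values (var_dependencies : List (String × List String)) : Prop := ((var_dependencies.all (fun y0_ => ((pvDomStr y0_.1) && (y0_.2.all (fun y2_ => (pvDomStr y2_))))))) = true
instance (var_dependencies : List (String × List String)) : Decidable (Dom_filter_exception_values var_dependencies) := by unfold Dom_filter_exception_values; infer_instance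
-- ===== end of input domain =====

-- B changes the per-list algorithm (one pass with a shrinking target multiset instead of three
-- scan-then-remove passes); same return value. Both Pythons mutate the dict/lists in place
-- identically; the dict keys are Strings, so A's pop of a None key is outside the type and not ported.

-- ===== PORT A =====
-- per key var: if var in l: l.remove(var); if 'this' in l: l.remove('this'); if 'msg' in l: l.remove('msg')
def pvAEntry (var : String) (l : List String) : List String :=
  let l := if l.contains var then (PySem.List.remove? l var).getD l else l
  let l := if l.contains "this" then (PySem.List.remove? l "this").getD l else l
  if l.contains "msg" then (PySem.List.remove? l "msg").getD l else l

def filter_exception_values (var_dependencies : List (String × List String)) : List (String × List String) :=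
  var_dependencies.map (fun p => (p.1, pvAEntry p.1 p.2))

-- ===== PORT B =====
-- one pass: keep x unless x is still in targets, in which case drop it and remove it from targets
def pvBPass (targets : List String) : List String → List String
  | [] => []
  | x :: xs =>
    if targets.contains x then pvBPass ((PySem.List.remove? targets x).getD targets) xs
    else x :: pvBPass targets xs

def filter_exception_values_alt (var_dependencies : List (String × List String)) : List (String × List String) :=
  var_dependencies.map (fun p => (p.1, pvBPass [p.1, "this", "msg"] p.2))

-- ===== PRECONDITION & SPEC =====
def Spec_filter_exception_values (var_dependencies : List (String × List String)) (out : List (String × List String)) : Prop := out = filter_exception_values_alt var_dependencies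
instance (var_dependencies : List (String × List String)) (out : List (String × List String)) : Decidable (Spec_filter_exception_values var_dependencies out) := by unfold Spec_filter_exception_values; infer_instance

-- ===== CLAIM (what is proved, stated in full; the proofs are below) =====
def Claim_equal_filter_exception_values : Prop := ∀ (var_dependencies : List (String × List String)), Dom_filter_exception_values var_dependencies → Spec_filter_exception_values var_dependencies (filter_exception_values var_dependencies)

-- ===== LEMMAS AND PROOFS =====

-- "if t in l: l.remove(t)" as a single function on lists
def pvRIf (t : String) (l : List String) : List String := if t ∈ l then l.erase t else l

theorem pvGetD_remove {t : String} {l : List String} (h : t ∈ l) :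
    (PySem.List.remove? l t).getD l = l.erase t := by
  rw [PySem.List.remove?_eq_some_erase l t h]; rfl

theorem pvRIf_guarded (t : String) (l : List String) :
    (if l.contains t then (PySem.List.remove? l t).getD l else l) = pvRIf t l := by
  by_cases h : t ∈ l
  · simp [pvRIf, h, pvGetD_remove h]
  · simp [pvRIf, h]

theorem pvAEntry_eq_foldl (var : String) (l : List String) :
    pvAEntry var l = [var, "this", "msg"].foldl (fun l t => pvRIf t l) l := by
  simp only [pvAEntry, pvRIf_guarded, List.foldl_cons, List.foldl_nil]

theorem pvRIf_cons_ne {t x : String} (hne : t ≠ x) (xs : List String) :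
    pvRIf t (x :: xs) = x :: pvRIf t xs := by
  have hxt : x ≠ t := fun e => hne e.symm
  by_cases hm : t ∈ xs
  · have hmem : t ∈ x :: xs := List.mem_cons_of_mem _ hm
    simp [pvRIf, hmem, hm, hxt]
  · have hmem : t ∉ x :: xs := by simp [hm, hne]
    simp [pvRIf, hmem, hm]

theorem pvFoldl_cons_of_not_mem {x : String} {ts : List String} (h : x ∉ ts)
    (xs : List String) :
    ts.foldl (fun l t => pvRIf t l) (x :: xs) = x :: ts.foldl (fun l t => pvRIf t l) xs := by
  induction ts generalizing xs with
  | nil => rfl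
  | cons t ts ih =>
    have hne : t ≠ x := fun e => h (e ▸ List.mem_cons_self)
    have hx : x ∉ ts := fun m => h (List.mem_cons_of_mem _ m)
    simp only [List.foldl_cons, pvRIf_cons_ne hne]
    exact ih hx (pvRIf t xs)

theorem pvFoldl_cons_of_mem {x : String} {ts : List String} (h : x ∈ ts)
    (xs : List String) :
    ts.foldl (fun l t => pvRIf t l) (x :: xs) = (ts.erase x).foldl (fun l t => pvRIf t l) xs := by
  induction ts generalizing xs with
  | nil => cases h
  | cons t ts ih =>
    by_cases he : t = x
    · subst he
      simp [pvRIf]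
    · have hx : x ∈ ts := by
        rcases List.mem_cons.mp h with h1 | h1
        · exact absurd h1.symm he
        · exact h1
      have herase : (t :: ts).erase x = t :: ts.erase x := by
        simp [he]
      simp only [List.foldl_cons, pvRIf_cons_ne he, herase]
      exact ih hx (pvRIf t xs)

theorem pvFoldl_nil (ts : List String) :
    ts.foldl (fun l t => pvRIf t l) [] = [] := by
  induction ts with
  | nil => rfl
  | cons t ts ih => simpa [pvRIf] using ih

theorem pvBPass_eq_foldl (ts xs : List String) :
    pvBPass ts xs = ts.foldl (fun l t => pvRIf t l) xs := by
  induction xs generalizing ts with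
  | nil => exact (pvFoldl_nil ts).symm
  | cons x xs ih =>
    by_cases h : x ∈ ts
    · have hc : ts.contains x = true := by simpa using h
      rw [pvBPass, hc, if_pos rfl, pvGetD_remove h, ih, pvFoldl_cons_of_mem h]
    · have hc : ts.contains x = false := by simpa using h
      rw [pvBPass, hc]
      simp only [Bool.false_eq_true, if_false]
      rw [ih, pvFoldl_cons_of_not_mem h]

theorem pvEntry_eq (var : String) (l : List String) :
    pvAEntry var l = pvBPass [var, "this", "msg"] l := by
  rw [pvAEntry_eq_foldl, pvBPass_eq_foldl]

-- ===== VERDICT (by name: the statement is the Claim_ definition above) =====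
theorem filter_exception_values_spec : Claim_equal_filter_exception_values := by
  intro var_dependencies _
  unfold Spec_filter_exception_values filter_exception_values filter_exception_values_alt
  exact List.map_congr_left (fun p _ => by rw [pvEntry_eq])
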